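-- pv_equiv track=rewrite | github.com/marielebouteiller/course | ConvolutionCyclopeptideSequencing.py | find_ext_alphabet
-- ===== SOURCE A (Python) =====
-- def find_ext_alphabet(conv, M):
--     conv_restricted = []
--     for i in conv:
--         if i < 201 and i > 56:
--             conv_restricted.append(i)
--     conv_count = {}
--     for i in conv_restricted:
--         if i not in conv_count.keys():
--             conv_count[i] = 0
--         conv_count[i] += 1
--     count = list(conv_count.values())
--     count.sort(reverse=True)
--     threshold = count[M]
--     ext_alphabet = []
--     for i in conv_restricted:
--         if conv_count[i] >= threshold:
--             if i not in ext_alphabet: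
--                 ext_alphabet.append(i)
--     ext_alphabet.sort()
--     return ext_alphabet
-- ===== SOURCE B (Python) =====
-- def find_ext_alphabet(conv, M):
--     # Sort the in-range values once; equal values become adjacent runs,
--     # so one linear scan yields each distinct value with its multiplicity,
--     # already in increasing order of value.
--     vals = sorted(v for v in conv if 56 < v < 201)
--     runs = []  # (value, multiplicity), values strictly increasing
--     i, n = 0, len(vals)
--     while i < n:
--         j = i + 1
--         while j < n and vals[j] == vals[i]:
--             j += 1
--         runs.append((vals[i], j - i))
--         i = j
--     threshold = sorted((c for _, c in runs), reverse=True)[M]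
--     return [v for v, c in runs if c >= threshold]
-- ===== Notes on version B (the rewrite author's own statement) =====
-- stated objective: alternative
-- what changed: B sorts the in-range values once and scans the adjacent runs to get each distinct value with its multiplicity, replacing A's hash-count pass plus the quadratic 'not in ext_alphabet' rescan of the full restricted list followed by a final sort.
import Mathlib
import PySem

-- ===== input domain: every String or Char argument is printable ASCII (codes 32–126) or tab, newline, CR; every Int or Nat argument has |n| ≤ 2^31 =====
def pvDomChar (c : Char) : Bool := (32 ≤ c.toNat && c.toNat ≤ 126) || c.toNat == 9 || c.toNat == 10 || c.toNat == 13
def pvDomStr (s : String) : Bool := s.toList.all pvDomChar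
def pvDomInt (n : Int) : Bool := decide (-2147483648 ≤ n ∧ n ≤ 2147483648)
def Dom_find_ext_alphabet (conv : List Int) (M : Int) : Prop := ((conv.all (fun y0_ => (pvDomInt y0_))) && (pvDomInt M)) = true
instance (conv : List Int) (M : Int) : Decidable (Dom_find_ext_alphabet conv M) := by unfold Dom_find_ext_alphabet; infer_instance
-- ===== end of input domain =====

-- B replaces A's dict-counting and quadratic `not in` dedup rescan by sort-then-group-runs (alternative decomposition).

-- ===== PORT A =====
def find_ext_alphabet (conv : List Int) (M : Int) : List Int :=
  let conv_restricted := conv.foldl (fun acc i => if i < 201 ∧ i > 56 then acc ++ [i] else acc) []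
  let conv_count := conv_restricted.foldl (fun d i =>
      let d1 := if d.contains i then d else d.insert i 0
      d1.insert i (d1.getD i 0 + 1)) (PySem.Dict.empty : PySem.Dict Int Int)
  let count := PySem.List.sorted conv_count.values (fun x => x) true
  match PySem.List.pyGet? count M with
  | none => []   -- Python raises IndexError here; excluded by Pre_
  | some threshold =>
    let ext := conv_restricted.foldl (fun acc i =>
      if conv_count.getD i 0 ≥ threshold then  -- conv_count[i]: key i is always present
        (if i ∈ acc then acc else acc ++ [i])
      else acc) []
    PySem.List.sorted ext (fun x => x) false

-- ===== PORT B =====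
-- the two nested while loops of Source B: take the leading run of equal values, recurse on the rest
def pvGroupRuns : List Int → List (Int × Int)
  | [] => []
  | v :: rest =>
      (v, 1 + ((rest.takeWhile (· == v)).length : Int)) :: pvGroupRuns (rest.dropWhile (· == v))
  termination_by l => l.length
  decreasing_by simpa using Nat.lt_succ_of_le (List.length_dropWhile_le _ rest)

def find_ext_alphabet_alt (conv : List Int) (M : Int) : List Int :=
  let vals := PySem.List.sorted (conv.filter (fun v => 56 < v ∧ v < 201)) (fun x => x) false
  let runs := pvGroupRuns vals
  match PySem.List.pyGet? (PySem.List.sorted (runs.map (fun p => p.2)) (fun x => x) true) M with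
  | none => []   -- Python raises IndexError here; excluded by Pre_
  | some threshold => (runs.filter (fun p => p.2 ≥ threshold)).map (fun p => p.1)

-- ===== PRECONDITION & SPEC =====
-- Pre_ excludes exactly the inputs on which Python A raises IndexError: M out of range of the
-- list of per-value counts, whose length is the number of distinct values of conv in (56, 201).
def Pre_find_ext_alphabet (conv : List Int) (M : Int) : Prop :=
  -((PySem.List.dedup (conv.filter (fun v => 56 < v ∧ v < 201))).length : Int) ≤ M ∧
    M < ((PySem.List.dedup (conv.filter (fun v => 56 < v ∧ v < 201))).length : Int)
instance (conv : List Int) (M : Int) : Decidable (Pre_find_ext_alphabet conv M) := by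
  unfold Pre_find_ext_alphabet; infer_instance

def pvWitness_find_ext_alphabet : List Int × Int := ([60, 60, 70], 0)

def Spec_find_ext_alphabet (conv : List Int) (M : Int) (out : List Int) : Prop := out = find_ext_alphabet_alt conv M
instance (conv : List Int) (M : Int) (out : List Int) : Decidable (Spec_find_ext_alphabet conv M out) := by unfold Spec_find_ext_alphabet; infer_instance

-- ===== CLAIM (what is proved, stated in full; the proofs are below) =====
def Claim_equal_find_ext_alphabet : Prop := ∀ (conv : List Int) (M : Int), Dom_find_ext_alphabet conv M → Pre_find_ext_alphabet conv M → Spec_find_ext_alphabet conv M (find_ext_alphabet conv M)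

-- ===== LEMMAS AND PROOFS =====

-- A's first loop is a filter
theorem pv_restricted_eq (conv : List Int) :
    conv.foldl (fun acc i => if i < 201 ∧ i > 56 then acc ++ [i] else acc) [] =
      conv.filter (fun v => 56 < v ∧ v < 201) := by
  have h := PySem.List.foldl_append_if (fun i : Int => decide (i < 201 ∧ i > 56)) id conv []
  simp only [decide_eq_true_eq, id_eq, List.map_id, List.nil_append] at h
  rw [h]
  exact List.filter_congr (by intro x _; simp only [decide_eq_decide]; constructor <;>
    exact fun h => ⟨h.2, h.1⟩)

-- A's counting loop builds Counter(R)
theorem pv_dict_eq (R : List Int) :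
    R.foldl (fun d i =>
        let d1 := if d.contains i then d else d.insert i 0
        d1.insert i (d1.getD i 0 + 1)) (PySem.Dict.empty : PySem.Dict Int Int) =
      PySem.Dict.counter R := by
  have hf : (fun (d : PySem.Dict Int Int) (i : Int) =>
      let d1 := if d.contains i then d else d.insert i 0
      d1.insert i (d1.getD i 0 + 1)) = fun d i => d.insert i (d.getD i 0 + 1) := by
    funext d i
    by_cases h : d.contains i
    · simp [h]
    · simp only [Bool.not_eq_true] at h
      simp [h, PySem.Dict.getD_of_not_contains d 0 h, PySem.Dict.getD_insert_self,
        PySem.Dict.insert_insert_self]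
  rw [hf, PySem.Dict.foldl_insert_getD_add_one_eq_counter]

-- A's dedup-with-membership loop over a filtered iteration
theorem pv_foldl_guard (q : Int → Prop) [DecidablePred q] (R : List Int) (acc : List Int) :
    R.foldl (fun acc i => if q i then (if i ∈ acc then acc else acc ++ [i]) else acc) acc =
      (R.filter (fun i => decide (q i))).foldl
        (fun acc i => if i ∈ acc then acc else acc ++ [i]) acc := by
  induction R generalizing acc with
  | nil => rfl
  | cons x xs ih =>
    simp only [List.foldl_cons, List.filter_cons]
    by_cases h : q x <;> simp [h, ih]

theorem pv_foldl_mem_eq_ofList (R : List Int) :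
    R.foldl (fun acc i => if i ∈ acc then acc else acc ++ [i]) [] = PySem.Set.ofList R := by
  have hf : (fun (acc : List Int) (i : Int) => if i ∈ acc then acc else acc ++ [i]) =
      PySem.Set.add := by
    funext acc i
    simp [PySem.Set.add]
  rw [hf]; rfl

theorem pv_values_counter (R : List Int) :
    (PySem.Dict.counter R).values = (PySem.Set.ofList R).map (fun k => (R.count k : Int)) := by
  show ((PySem.Dict.counter R).items.map Prod.snd) = _
  rw [PySem.Dict.items_counter]
  simp [List.map_map, Function.comp]

-- grouping the runs of a sorted list: heads are strictly increasing, carry the multiplicities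
theorem pv_groupRuns_spec : ∀ (L : List Int), L.Pairwise (· ≤ ·) →
    ((pvGroupRuns L).map Prod.fst).Pairwise (· < ·) ∧
    (∀ v : Int, v ∈ (pvGroupRuns L).map Prod.fst ↔ v ∈ L) ∧
    (∀ p ∈ pvGroupRuns L, p.2 = (L.count p.1 : Int)) := by
  intro L
  induction L using pvGroupRuns.induct with
  | case1 => intro _; simp [pvGroupRuns]
  | case2 v rest ih =>
    intro h
    rw [List.pairwise_cons] at h
    obtain ⟨hv, hrest⟩ := h
    set t := rest.takeWhile (· == v) with ht_def
    set d := rest.dropWhile (· == v) with hd_def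
    have hsplit : t ++ d = rest := List.takeWhile_append_dropWhile
    have ht : ∀ x ∈ t, x = v := fun x hx => by
      have := List.mem_takeWhile_imp hx; simpa using this
    have hd_pair : d.Pairwise (· ≤ ·) := hrest.sublist (List.dropWhile_sublist _)
    have hd_mem : ∀ x ∈ d, x ∈ rest := fun x hx =>
      (List.dropWhile_sublist _).mem hx
    have hvd : ∀ x ∈ d, v < x := by
      intro x hx
      cases hd : d with
      | nil => rw [hd] at hx; cases hx
      | cons h0 tl =>
        have hh0 : h0 ≠ v := by
          have h2 := List.head?_dropWhile_not (fun x => x == v) rest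
          rw [← hd_def, hd] at h2
          simpa using h2
        have hvh0 : v < h0 := lt_of_le_of_ne (hv h0 (hd_mem h0 (by rw [hd]; simp)))
          (fun e => hh0 e.symm)
        rw [hd] at hx
        rcases List.mem_cons.mp hx with rfl | hx'
        · exact hvh0
        · have : h0 ≤ x := by
            rw [hd] at hd_pair
            exact (List.pairwise_cons.mp hd_pair).1 x hx'
          omega
    have hvnotd : v ∉ d := fun hmem => lt_irrefl v (hvd v hmem)
    have hcount_t : t.count v = t.length := List.count_eq_length.mpr (fun b hb => (ht b hb).symm)
    have hcount_d : d.count v = 0 := List.count_eq_zero.mpr hvnotd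
    have hcount_v : (v :: rest).count v = 1 + t.length := by
      rw [List.count_cons_self, ← hsplit, List.count_append, hcount_t, hcount_d]
      omega
    obtain ⟨iha, ihb, ihc⟩ := ih hd_pair
    have hruns : pvGroupRuns (v :: rest) =
        (v, 1 + (t.length : Int)) :: pvGroupRuns d := by
      rw [pvGroupRuns]
    refine ⟨?_, ?_, ?_⟩
    · rw [hruns]
      simp only [List.map_cons, List.pairwise_cons]
      exact ⟨fun x hx => hvd x ((ihb x).mp hx), iha⟩
    · intro x
      rw [hruns]
      simp only [List.map_cons, List.mem_cons, ihb x]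
      constructor
      · rintro (rfl | hx)
        · exact Or.inl rfl
        · exact Or.inr (hd_mem x hx)
      · rintro (rfl | hx)
        · exact Or.inl rfl
        · rw [← hsplit] at hx
          rcases List.mem_append.mp hx with hx | hx
          · exact Or.inl (ht x hx)
          · exact Or.inr hx
    · intro p hp
      rw [hruns] at hp
      rcases List.mem_cons.mp hp with rfl | hp'
      · simp only [hcount_v]; push_cast; ring
      · have hp1d : p.1 ∈ d := (ihb p.1).mp (List.mem_map_of_mem hp')
        have hp1v : p.1 ≠ v := fun e => hvnotd (e ▸ hp1d)
        have hct : t.count p.1 = 0 :=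
          List.count_eq_zero.mpr (fun hmem => hp1v (ht _ hmem))
        have : (v :: rest).count p.1 = d.count p.1 := by
          rw [List.count_cons_of_ne (Ne.symm hp1v), ← hsplit, List.count_append, hct]
          omega
        rw [ihc p hp', this]

-- filtering pairs whose second component is a function of the first
theorem pv_filter_map_fst (th : Int) (f : Int → Int) :
    ∀ (rs : List (Int × Int)), (∀ p ∈ rs, p.2 = f p.1) →
      (rs.filter (fun p => p.2 ≥ th)).map Prod.fst =
        (rs.map Prod.fst).filter (fun v => f v ≥ th) := by
  intro rs
  induction rs with
  | nil => intro _; rfl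
  | cons p ps ih =>
    intro hall
    have hp := hall p (.head _)
    have hps := fun q hq => hall q (.tail _ hq)
    simp only [List.filter_cons, List.map_cons, hp]
    by_cases h : f p.1 ≥ th <;> simp [h, ih hps]

theorem main_equiv : ∀ (conv : List Int) (M : Int),
    find_ext_alphabet conv M = find_ext_alphabet_alt conv M := by
  intro conv M
  simp only [find_ext_alphabet, find_ext_alphabet_alt]
  rw [pv_restricted_eq, pv_dict_eq]
  set R := conv.filter (fun v => decide (56 < v ∧ v < 201)) with hR
  set L := PySem.List.sorted R (fun x => x) false with hL
  obtain ⟨ha, hb, hc⟩ := pv_groupRuns_spec L (PySem.List.sorted_pairwise R (fun x => x))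
  have hcountL : ∀ x : Int, L.count x = R.count x :=
    fun x => (PySem.List.sorted_perm R (fun x => x) false).count_eq x
  have hmemL : ∀ x : Int, x ∈ L ↔ x ∈ R :=
    fun x => PySem.List.mem_sorted R (fun x => x) false x
  have hnodup_fst : ((pvGroupRuns L).map Prod.fst).Nodup :=
    ha.imp (fun h => ne_of_lt h)
  have hfst_perm : ((pvGroupRuns L).map Prod.fst).Perm (PySem.Set.ofList R) :=
    (List.perm_ext_iff_of_nodup hnodup_fst (PySem.Set.nodup_ofList R)).mpr (fun a => by
      rw [hb a, PySem.Set.mem_ofList, hmemL a])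
  have hsnd : (pvGroupRuns L).map (fun p => p.2) =
      ((pvGroupRuns L).map Prod.fst).map (fun v => (R.count v : Int)) := by
    rw [List.map_map]
    refine List.map_congr_left (fun p hp => ?_)
    simp only [Function.comp]
    rw [hc p hp, hcountL]
  have hvalperm : ((pvGroupRuns L).map (fun p => p.2)).Perm ((PySem.Dict.counter R).values) := by
    rw [hsnd, pv_values_counter]
    exact hfst_perm.map _
  have hsorted_eq : PySem.List.sorted ((PySem.Dict.counter R).values) (fun x => x) true
      = PySem.List.sorted ((pvGroupRuns L).map (fun p => p.2)) (fun x => x) true := by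
    refine PySem.List.eq_of_perm_of_pairwise_le_of_injective (fun x : Int => -x) neg_injective
      (((PySem.List.sorted_perm _ _ _).trans hvalperm.symm).trans
        (PySem.List.sorted_perm _ _ _).symm) ?_ ?_
    · exact (PySem.List.sorted_pairwise_rev _ _).imp (fun h => neg_le_neg h)
    · exact (PySem.List.sorted_pairwise_rev _ _).imp (fun h => neg_le_neg h)
  rw [hsorted_eq]
  cases hth : PySem.List.pyGet?
      (PySem.List.sorted ((pvGroupRuns L).map (fun p => p.2)) (fun x => x) true) M with
  | none => rfl
  | some th =>
    dsimp only
    rw [pv_foldl_guard, pv_foldl_mem_eq_ofList,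
      pv_filter_map_fst th (fun v => (R.count v : Int)) _
        (fun p hp => by rw [hc p hp, hcountL])]
    refine PySem.List.sorted_eq_of_perm_of_pairwise_lt _ _ _ ?_ (List.Pairwise.filter _ ha)
    refine (List.perm_ext_iff_of_nodup (hnodup_fst.filter _) (PySem.Set.nodup_ofList _)).mpr
      (fun a => ?_)
    simp only [List.mem_filter, PySem.Set.mem_ofList, hb a, hmemL a,
      PySem.Dict.getD_counter]

-- ===== VERDICT (by name: the statement is the Claim_ definition above) =====
theorem find_ext_alphabet_spec : Claim_equal_find_ext_alphabet := by
  intro conv M _ _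
  unfold Spec_find_ext_alphabet
  exact main_equiv conv M
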